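-- pv_equiv track=rewrite | github.com/guitongli/rosalinddrills | ros002.py | get_overlap_graph
-- ===== SOURCE A (Python) =====
-- def has_overlap(s, t, k):
--     # TODO this breaks when k > len(s) or len(t)
--     suffix = s[-k:]
--     prefix = t[:k]
--     return suffix == prefix
--
-- def get_overlap_graph(fasta_dict, k):
--     nodes = list(fasta_dict.keys())
--     edges = []
--     for label, dna in fasta_dict.items():
--         for other_label, other_dna in [
--             (other_label, other_dna) for other_label, other_dna in fasta_dict.items() if other_label != label
--         ]:
--             if has_overlap(dna, other_dna, k):
--                 edges.append((label, other_label))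
--     return nodes, edges
-- ===== SOURCE B (Python) =====
-- def get_overlap_graph(fasta_dict, k):
--     # Index every node by its k-prefix once, then look up each node's k-suffix:
--     # one dict lookup replaces the inner scan over all other nodes.
--     index = {}
--     for label, dna in fasta_dict.items():
--         index.setdefault(dna[:k], []).append(label)
--     edges = []
--     for label, dna in fasta_dict.items():
--         for other_label in index.get(dna[-k:], []):
--             if other_label != label:
--                 edges.append((label, other_label))
--     return list(fasta_dict.keys()), edges
-- ===== Notes on version B (the rewrite author's own statement) =====
-- stated objective: faster
-- what changed: B builds a hash index from k-prefix to labels in one pass and looks up each node's k-suffix, replacing A's quadratic all-pairs scan with per-node dict lookups.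
import Mathlib
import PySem

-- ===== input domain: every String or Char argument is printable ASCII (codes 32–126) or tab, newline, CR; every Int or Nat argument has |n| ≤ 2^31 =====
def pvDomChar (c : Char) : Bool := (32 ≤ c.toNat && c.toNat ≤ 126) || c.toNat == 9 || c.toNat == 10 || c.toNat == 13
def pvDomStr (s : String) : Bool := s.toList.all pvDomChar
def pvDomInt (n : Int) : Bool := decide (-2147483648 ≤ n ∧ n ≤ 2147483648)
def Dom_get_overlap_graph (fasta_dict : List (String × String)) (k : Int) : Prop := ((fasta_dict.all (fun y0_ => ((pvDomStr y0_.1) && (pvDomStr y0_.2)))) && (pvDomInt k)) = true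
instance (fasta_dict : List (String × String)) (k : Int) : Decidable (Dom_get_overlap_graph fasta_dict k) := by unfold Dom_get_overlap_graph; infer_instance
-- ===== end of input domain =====

-- B replaces A's quadratic all-pairs suffix/prefix scan by a dict indexing nodes by k-prefix,
-- looked up at each node's k-suffix (objective: faster, asymptotic).
-- Both ports receive the Python dict as an association list and normalise it with PySem.Dict.ofList
-- (exactly dict(pairs): first-occurrence position, last value).

-- ===== PORT A =====
def pv_has_overlap (s t : String) (k : Int) : Bool :=
  -- suffix = s[-k:]; prefix = t[:k]; suffix == prefix
  PySem.Str.slice s (some (-k)) none == PySem.Str.slice t none (some k)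

def get_overlap_graph (fasta_dict : List (String × String)) (k : Int) : List String × (List (String × String)) :=
  let d := PySem.Dict.ofList fasta_dict
  let nodes := d.keys
  let edges := d.items.foldl (fun edges ld =>
    ((d.items.filter (fun p => p.1 != ld.1)).foldl (fun edges od =>
      if pv_has_overlap ld.2 od.2 k then edges ++ [(ld.1, od.1)] else edges) edges)) []
  (nodes, edges)

-- ===== PORT B =====
def get_overlap_graph_alt (fasta_dict : List (String × String)) (k : Int) : List String × (List (String × String)) :=
  let d := PySem.Dict.ofList fasta_dict
  -- index.setdefault(dna[:k], []).append(label)  ==  index[dna[:k]] = index.get(dna[:k], []) + [label]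
  let index := d.items.foldl (fun idx p =>
    idx.modify (PySem.Str.slice p.2 none (some k)) [] (· ++ [p.1]))
    (PySem.Dict.empty : PySem.Dict String (List String))
  let edges := d.items.foldl (fun edges p =>
    ((index.getD (PySem.Str.slice p.2 (some (-k)) none) []).foldl (fun edges o =>
      if o != p.1 then edges ++ [(p.1, o)] else edges) edges)) []
  (d.keys, edges)

-- ===== PRECONDITION & SPEC =====
def Spec_get_overlap_graph (fasta_dict : List (String × String)) (k : Int) (out : List String × (List (String × String))) : Prop := out = get_overlap_graph_alt fasta_dict k
instance (fasta_dict : List (String × String)) (k : Int) (out : List String × (List (String × String))) : Decidable (Spec_get_overlap_graph fasta_dict k out) := by unfold Spec_get_overlap_graph; infer_instance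

-- ===== CLAIM (what is proved, stated in full; the proofs are below) =====
def Claim_equal_get_overlap_graph : Prop := ∀ (fasta_dict : List (String × String)) (k : Int), Dom_get_overlap_graph fasta_dict k → Spec_get_overlap_graph fasta_dict k (get_overlap_graph fasta_dict k)

-- ===== LEMMAS AND PROOFS =====

-- B's index, looked up at key c, is exactly the labels of the items whose k-prefix is c.
theorem pv_index_getD (items : List (String × String)) (k : Int) (c : String) :
    (items.foldl (fun idx p =>
      idx.modify (PySem.Str.slice p.2 none (some k)) [] (· ++ [p.1]))
      (PySem.Dict.empty : PySem.Dict String (List String))).getD c []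
    = (items.filter (fun p => PySem.Str.slice p.2 none (some k) == c)).map (·.1) := by
  have h := PySem.Dict.getD_foldl_modify_append
    (l := items.map (fun p => (PySem.Str.slice p.2 none (some k), p.1)))
    (d := (PySem.Dict.empty : PySem.Dict String (List String))) (c := c)
  simpa [List.foldl_map, List.filter_map, Function.comp, List.map_map] using h

-- For one source node ld, A's inner loop and B's inner loop append the same edge list.
theorem pv_inner_eq (items : List (String × String)) (k : Int) (ld : String × String)
    (edges : List (String × String)) :
    ((items.filter (fun p => p.1 != ld.1)).foldl (fun edges od =>
      if pv_has_overlap ld.2 od.2 k then edges ++ [(ld.1, od.1)] else edges) edges)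
    = (((items.foldl (fun idx p =>
        idx.modify (PySem.Str.slice p.2 none (some k)) [] (· ++ [p.1]))
        (PySem.Dict.empty : PySem.Dict String (List String))).getD
          (PySem.Str.slice ld.2 (some (-k)) none) []).foldl (fun edges o =>
        if o != ld.1 then edges ++ [(ld.1, o)] else edges) edges) := by
  rw [pv_index_getD]
  simp only [PySem.List.foldl_append_if]
  rw [List.filter_map, List.map_map]
  rw [List.filter_filter, List.filter_filter]
  simp only [Function.comp_def]
  congr 1
  refine congrArg (List.map _) (List.filter_congr fun a _ => ?_)
  simp only [pv_has_overlap]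
  rw [Bool.and_comm]
  simp [Bool.beq_comm]

-- ===== VERDICT (by name: the statement is the Claim_ definition above) =====
theorem get_overlap_graph_spec : Claim_equal_get_overlap_graph := by
  intro fasta_dict k _
  unfold Spec_get_overlap_graph get_overlap_graph get_overlap_graph_alt
  simp only
  refine Prod.ext rfl ?_
  exact PySem.List.foldl_congr_mem _ _ _ _ (fun edges ld _ => pv_inner_eq _ k ld edges)
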